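-- pv_equiv track=rewrite | github.com/Fay1Yee/Canal-public | waterbook_public/realtime_audio_visualizer.py | _map_panns_class
-- ===== SOURCE A (Python) =====
-- def _map_panns_class(panns_class: str) -> str:
--     """将PANNs类别映射到我们的类别"""
--     panns_class_lower = panns_class.lower()
--
--     if any(word in panns_class_lower for word in ['water', 'stream', 'river', 'flow']):
--         return "水声"
--     elif any(word in panns_class_lower for word in ['boat', 'ship', 'motor']):
--         return "船只"
--     elif any(word in panns_class_lower for word in ['bird', 'chirp', 'tweet', 'sing']):
--         return "鸟鸣"
--     elif any(word in panns_class_lower for word in ['wind', 'breeze', 'air']):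
--         return "风声"
--     elif any(word in panns_class_lower for word in ['speech', 'voice', 'talk', 'conversation']):
--         return "人声"
--     elif any(word in panns_class_lower for word in ['music', 'instrument', 'song']):
--         return "音乐"
--     elif any(word in panns_class_lower for word in ['car', 'vehicle', 'traffic', 'engine']):
--         return "车辆"
--     elif any(word in panns_class_lower for word in ['nature', 'outdoor', 'ambient']):
--         return "自然"
--     elif any(word in panns_class_lower for word in ['silence', 'quiet']):
--         return "安静"
--     else:
--         return "未知"
-- ===== SOURCE B (Python) =====
-- # Category priorities: lower index = higher priority (matches the original branch order).
-- _CATEGORIES = ["水声", "船只", "鸟鸣", "风声", "人声", "音乐", "车辆", "自然", "安静"]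
--
-- # Flat keyword -> priority index table (ungrouped).
-- _FLAT_KEYWORDS = [
--     ("water", 0), ("stream", 0), ("river", 0), ("flow", 0),
--     ("boat", 1), ("ship", 1), ("motor", 1),
--     ("bird", 2), ("chirp", 2), ("tweet", 2), ("sing", 2),
--     ("wind", 3), ("breeze", 3), ("air", 3),
--     ("speech", 4), ("voice", 4), ("talk", 4), ("conversation", 4),
--     ("music", 5), ("instrument", 5), ("song", 5),
--     ("car", 6), ("vehicle", 6), ("traffic", 6), ("engine", 6),
--     ("nature", 7), ("outdoor", 7), ("ambient", 7),
--     ("silence", 8), ("quiet", 8),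
-- ]
--
-- def _map_panns_class(panns_class: str) -> str:
--     """Single flat pass over every keyword, keeping the minimum matched priority."""
--     lower = panns_class.lower()
--     best = None
--     for keyword, priority in _FLAT_KEYWORDS:
--         if keyword in lower:
--             best = priority if best is None else min(best, priority)
--     if best is None:
--         return "未知"
--     return _CATEGORIES[best]
-- ===== Notes on version B (the rewrite author's own statement) =====
-- stated objective: alternative
-- what changed: Replaces the nine-branch short-circuit if/elif chain with a single exhaustive pass over a flat (keyword, priority) list that keeps the minimum matched priority index, followed by one array lookup into the category table.
import Mathlib
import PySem

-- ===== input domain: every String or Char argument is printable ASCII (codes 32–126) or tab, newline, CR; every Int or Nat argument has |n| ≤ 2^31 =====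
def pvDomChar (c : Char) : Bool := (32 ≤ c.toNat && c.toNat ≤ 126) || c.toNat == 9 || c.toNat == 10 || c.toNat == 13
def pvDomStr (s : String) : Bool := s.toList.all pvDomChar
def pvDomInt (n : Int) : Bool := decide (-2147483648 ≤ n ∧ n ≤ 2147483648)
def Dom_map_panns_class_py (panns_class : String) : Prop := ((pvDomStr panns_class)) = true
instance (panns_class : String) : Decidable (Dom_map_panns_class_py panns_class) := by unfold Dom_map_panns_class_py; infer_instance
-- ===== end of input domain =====

-- B replaces the if/elif chain with one exhaustive pass over a flat (keyword, priority) list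
-- keeping the minimum matched priority, then one category-array lookup; alternative, same cost.


-- ===== PORT A =====
def map_panns_class_py (panns_class : String) : String :=
  let panns_class_lower := PySem.Str.lower panns_class
  if ["water", "stream", "river", "flow"].any (fun word => PySem.Str.isIn word panns_class_lower) then "水声"
  else if ["boat", "ship", "motor"].any (fun word => PySem.Str.isIn word panns_class_lower) then "船只"
  else if ["bird", "chirp", "tweet", "sing"].any (fun word => PySem.Str.isIn word panns_class_lower) then "鸟鸣"
  else if ["wind", "breeze", "air"].any (fun word => PySem.Str.isIn word panns_class_lower) then "风声"
  else if ["speech", "voice", "talk", "conversation"].any (fun word => PySem.Str.isIn word panns_class_lower) then "人声"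
  else if ["music", "instrument", "song"].any (fun word => PySem.Str.isIn word panns_class_lower) then "音乐"
  else if ["car", "vehicle", "traffic", "engine"].any (fun word => PySem.Str.isIn word panns_class_lower) then "车辆"
  else if ["nature", "outdoor", "ambient"].any (fun word => PySem.Str.isIn word panns_class_lower) then "自然"
  else if ["silence", "quiet"].any (fun word => PySem.Str.isIn word panns_class_lower) then "安静"
  else "未知"

-- ===== PORT B =====
def pvCategories : List String :=
  ["水声", "船只", "鸟鸣", "风声", "人声", "音乐", "车辆", "自然", "安静"]

def pvFlatKeywords : List (String × Nat) :=
  [("water", 0), ("stream", 0), ("river", 0), ("flow", 0),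
   ("boat", 1), ("ship", 1), ("motor", 1),
   ("bird", 2), ("chirp", 2), ("tweet", 2), ("sing", 2),
   ("wind", 3), ("breeze", 3), ("air", 3),
   ("speech", 4), ("voice", 4), ("talk", 4), ("conversation", 4),
   ("music", 5), ("instrument", 5), ("song", 5),
   ("car", 6), ("vehicle", 6), ("traffic", 6), ("engine", 6),
   ("nature", 7), ("outdoor", 7), ("ambient", 7),
   ("silence", 8), ("quiet", 8)]

-- the loop body of Source B: update the minimum matched priority
def pvStep (lower : String) (acc : Option Nat) (p : String × Nat) : Option Nat :=
  if PySem.Str.isIn p.1 lower then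
    match acc with
    | none => some p.2
    | some j => some (min j p.2)
  else acc

def map_panns_class_py_alt (panns_class : String) : String :=
  let lower := PySem.Str.lower panns_class
  match pvFlatKeywords.foldl (pvStep lower) none with
  | none => "未知"
  | some best => pvCategories.getD best "未知"
  -- best < 9 always, so Python's _CATEGORIES[best] never raises; getD is exact here

-- ===== PRECONDITION & SPEC =====
def Spec_map_panns_class_py (panns_class : String) (out : String) : Prop := out = map_panns_class_py_alt panns_class
instance (panns_class : String) (out : String) : Decidable (Spec_map_panns_class_py panns_class out) := by unfold Spec_map_panns_class_py; infer_instance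

-- ===== CLAIM (what is proved, stated in full; the proofs are below) =====
def Claim_equal_map_panns_class_py : Prop := ∀ (panns_class : String), Dom_map_panns_class_py panns_class → Spec_map_panns_class_py panns_class (map_panns_class_py panns_class)

-- ===== LEMMAS AND PROOFS =====

-- grouped view of the flat keyword table, used only by the proof
def pvTable : List (String × List String) :=
  [("水声", ["water", "stream", "river", "flow"]),
   ("船只", ["boat", "ship", "motor"]),
   ("鸟鸣", ["bird", "chirp", "tweet", "sing"]),
   ("风声", ["wind", "breeze", "air"]),
   ("人声", ["speech", "voice", "talk", "conversation"]),
   ("音乐", ["music", "instrument", "song"]),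
   ("车辆", ["car", "vehicle", "traffic", "engine"]),
   ("自然", ["nature", "outdoor", "ambient"]),
   ("安静", ["silence", "quiet"])]

def pvTag (b : Nat) (g : List String) : List (String × Nat) := g.map (fun w => (w, b))

def pvFlatTag (b : Nat) : List (List String) → List (String × Nat)
  | [] => []
  | g :: gs => pvTag b g ++ pvFlatTag (b + 1) gs

def pvChainIdx (lower : String) : List (List String) → Option Nat
  | [] => none
  | g :: gs =>
      if g.any (fun w => PySem.Str.isIn w lower) then some 0
      else (pvChainIdx lower gs).map (· + 1)

def pvChainLookup (lower : String) : List (String × List String) → String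
  | [] => "未知"
  | (cat, kws) :: rest =>
      if kws.any (fun w => PySem.Str.isIn w lower) then cat else pvChainLookup lower rest

lemma pv_seg_some (lower : String) (g : List String) (j b : Nat) (h : j ≤ b) :
    (pvTag b g).foldl (pvStep lower) (some j) = some j := by
  induction g with
  | nil => rfl
  | cons w ws ih =>
      simp only [pvTag, List.map_cons, List.foldl_cons, pvStep]
      by_cases hw : PySem.Str.isIn w lower = true
      · rw [if_pos hw]
        show (pvTag b ws).foldl (pvStep lower) (some (min j b)) = some j
        rw [Nat.min_eq_left h]
        exact ih
      · rw [if_neg hw]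
        exact ih

lemma pv_S (lower : String) (gs : List (List String)) (b j : Nat) (h : j ≤ b) :
    (pvFlatTag b gs).foldl (pvStep lower) (some j) = some j := by
  induction gs generalizing b with
  | nil => rfl
  | cons g gs ih =>
      simp only [pvFlatTag, List.foldl_append, pv_seg_some lower g j b h]
      exact ih (b + 1) (Nat.le_succ_of_le h)

lemma pv_seg_none (lower : String) (g : List String) (b : Nat) :
    (pvTag b g).foldl (pvStep lower) none =
      if g.any (fun w => PySem.Str.isIn w lower) then some b else none := by
  induction g with
  | nil => rfl
  | cons w ws ih =>
      simp only [pvTag, List.map_cons, List.foldl_cons, pvStep, List.any_cons]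
      by_cases hw : PySem.Str.isIn w lower = true
      · rw [if_pos hw]
        simp only [hw, Bool.true_or]
        exact pv_seg_some lower ws b b (Nat.le_refl b)
      · rw [if_neg hw]
        have hwf : PySem.Str.isIn w lower = false := by
          revert hw; cases PySem.Str.isIn w lower <;> simp
        simp only [hwf, Bool.false_or]
        exact ih

lemma pv_L (lower : String) (gs : List (List String)) (b : Nat) :
    (pvFlatTag b gs).foldl (pvStep lower) none = (pvChainIdx lower gs).map (b + ·) := by
  induction gs generalizing b with
  | nil => rfl
  | cons g gs ih =>
      simp only [pvFlatTag, List.foldl_append, pv_seg_none, pvChainIdx]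
      split_ifs with hg
      · rw [pv_S lower gs (b + 1) b (Nat.le_succ b)]
        simp
      · rw [ih (b + 1)]
        cases pvChainIdx lower gs with
        | none => rfl
        | some i => simp only [Option.map_some]; congr 1; omega

lemma pv_M (lower : String) (table : List (String × List String)) :
    (match pvChainIdx lower (table.map (·.2)) with
     | none => "未知"
     | some i => (table.map (·.1)).getD i "未知") = pvChainLookup lower table := by
  induction table with
  | nil => rfl
  | cons p rest ih =>
      obtain ⟨cat, kws⟩ := p
      simp only [List.map_cons, pvChainIdx, pvChainLookup]
      split_ifs with hk
      · rfl
      · rw [← ih]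
        cases pvChainIdx lower (rest.map (·.2)) with
        | none => rfl
        | some i => simp [List.getD]

lemma pv_alt_eq_chain (s : String) :
    map_panns_class_py_alt s = pvChainLookup (PySem.Str.lower s) pvTable := by
  simp only [map_panns_class_py_alt]
  rw [show pvFlatKeywords = pvFlatTag 0 (pvTable.map (·.2)) by decide,
      pv_L (PySem.Str.lower s) (pvTable.map (·.2)) 0,
      show pvCategories = pvTable.map (·.1) from rfl,
      ← pv_M (PySem.Str.lower s) pvTable]
  cases pvChainIdx (PySem.Str.lower s) (pvTable.map (·.2)) with
  | none => rfl
  | some i => simp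

-- ===== VERDICT (by name: the statement is the Claim_ definition above) =====
theorem map_panns_class_py_spec : Claim_equal_map_panns_class_py := by
  intro s _
  unfold Spec_map_panns_class_py
  rw [pv_alt_eq_chain]
  simp only [map_panns_class_py, pvTable, pvChainLookup]
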